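-- pv_equiv track=rewrite | github.com/fjclark/BioSimSpace | python/BioSimSpace/Sandpit/Exscientia/Align/_squash.py | _amber_mask_from_indices
-- ===== SOURCE A (Python) =====
-- import itertools as _it
--
-- def _amber_mask_from_indices(atom_idxs):
--     """Internal helper function to create an AMBER mask from a list of atom indices.
--
--        Parameters
--        ----------
--
--        atom_idxs : [int]
--            A list of atom indices.
--
--        Returns
--        -------
--
--        mask : str
--            The AMBER mask.
--     """
--     # AMBER has a restriction on the number of characters in the restraint
--     # mask (not documented) so we can't just use comma-separated atom
--     # indices. Instead we loop through the indices and use hyphens to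
--     # separate contiguous blocks of indices, e.g. 1-23,34-47,...
--
--     if atom_idxs:
--         # AMBER masks are 1-indexed, while BioSimSpace indices are 0-indexed.
--         atom_idxs = [x + 1 for x in sorted(list(set(atom_idxs)))]
--         if not all(isinstance(x, int) for x in atom_idxs):
--             raise TypeError("'atom_idxs' must be a list of 'int' types.")
--         groups = []
--         initial_idx = atom_idxs[0]
--         for prev_idx, curr_idx in _it.zip_longest(atom_idxs, atom_idxs[1:]):
--             if curr_idx != prev_idx + 1 or curr_idx is None:
--                 if initial_idx == prev_idx:
--                     groups += [str(initial_idx)]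
--                 else:
--                     groups += [f"{initial_idx}-{prev_idx}"]
--                 initial_idx = curr_idx
--         mask = "@" + ",".join(groups)
--     else:
--         mask = ""
--
--     return mask
-- ===== SOURCE B (Python) =====
-- import itertools as _it
--
-- def _amber_mask_from_indices(atom_idxs):
--     """Build an AMBER mask of contiguous 1-indexed ranges from atom indices."""
--     if not atom_idxs:
--         return ""
--     vals = [x + 1 for x in sorted(set(atom_idxs))]
--     if not all(isinstance(x, int) for x in vals):
--         raise TypeError("'atom_idxs' must be a list of 'int' types.")
--     parts = []
--     for _, grp in _it.groupby(enumerate(vals), key=lambda p: p[1] - p[0]):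
--         g = [v for _, v in grp]
--         parts.append(str(g[0]) if len(g) == 1 else f"{g[0]}-{g[-1]}")
--     return "@" + ",".join(parts)
-- ===== Notes on version B (the rewrite author's own statement) =====
-- stated objective: idiomatic
-- what changed: Replaces A's zip_longest pairwise scan with explicit run-start bookkeeping by grouping the sorted values into maximal consecutive runs via itertools.groupby(enumerate(vals), key=v-i) and formatting each run from its first/last element.
import Mathlib
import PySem

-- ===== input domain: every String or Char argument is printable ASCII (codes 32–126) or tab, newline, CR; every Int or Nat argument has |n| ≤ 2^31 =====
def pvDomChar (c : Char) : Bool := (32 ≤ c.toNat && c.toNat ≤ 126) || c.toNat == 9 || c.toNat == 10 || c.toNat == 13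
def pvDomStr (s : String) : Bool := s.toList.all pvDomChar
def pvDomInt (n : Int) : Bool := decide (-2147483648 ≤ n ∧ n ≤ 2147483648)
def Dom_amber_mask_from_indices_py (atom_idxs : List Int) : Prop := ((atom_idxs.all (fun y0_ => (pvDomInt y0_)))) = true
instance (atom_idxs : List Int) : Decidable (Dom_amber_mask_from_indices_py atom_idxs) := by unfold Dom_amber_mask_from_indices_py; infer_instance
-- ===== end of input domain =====

-- B groups the sorted deduplicated values into maximal consecutive runs directly
-- (itertools.groupby on enumerate with key v-i) instead of A's zip_longest pair scan; objective: idiomatic.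

-- ===== PORT A =====
-- the for-loop over zip_longest(atom_idxs, atom_idxs[1:]): each step sees prev = head
-- and curr = next element (the last step has curr = None, which ends the loop after emitting).
def pvLoopA : List Int → Int → List String → List String
  | [], _, groups => groups
  | [prev], initial, groups =>
      -- curr is None: emit the final group
      if initial = prev then groups ++ [PySem.Int.toStr initial]
      else groups ++ [PySem.Int.toStr initial ++ "-" ++ PySem.Int.toStr prev]
  | prev :: curr :: rest, initial, groups =>
      if curr ≠ prev + 1 then
        pvLoopA (curr :: rest) curr
          (if initial = prev then groups ++ [PySem.Int.toStr initial]
           else groups ++ [PySem.Int.toStr initial ++ "-" ++ PySem.Int.toStr prev])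
      else pvLoopA (curr :: rest) initial groups

def amber_mask_from_indices_py (atom_idxs : List Int) : String :=
  if atom_idxs.isEmpty then ""
  else
    -- atom_idxs = [x + 1 for x in sorted(list(set(atom_idxs)))]; the isinstance check never fires on ints
    let vals := (PySem.List.sorted (PySem.Set.ofList atom_idxs) (fun x => x) false).map (· + 1)
    "@" ++ PySem.Str.join "," (pvLoopA vals (vals.headD 0) [])

-- ===== PORT B =====
-- groupby(enumerate(vals), key=lambda p: p[1]-p[0]) yields exactly the maximal runs of
-- consecutive values; ported by hand as a run-splitting recursion (exact: the key v-i is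
-- constant on a run and changes whenever the next value is not prev+1).
def pvSpanRun (v : Int) : List Int → List Int × List Int
  | [] => ([], [])
  | w :: ws =>
      if w = v + 1 then ((w :: (pvSpanRun w ws).1), (pvSpanRun w ws).2)
      else ([], w :: ws)

theorem pvSpanRun_snd_len (v : Int) (vs : List Int) : (pvSpanRun v vs).2.length ≤ vs.length := by
  induction vs generalizing v with
  | nil => simp [pvSpanRun]
  | cons w ws ih =>
    simp only [pvSpanRun]
    split
    · exact le_trans (ih w) (Nat.le_succ _)
    · exact le_refl _

def pvGroupRuns : List Int → List (List Int)
  | [] => []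
  | v :: vs => (v :: (pvSpanRun v vs).1) :: pvGroupRuns (pvSpanRun v vs).2
termination_by l => l.length
decreasing_by
  exact Nat.lt_succ_of_le (pvSpanRun_snd_len v vs)

-- str(g[0]) if len(g)==1 else f"{g[0]}-{g[-1]}"  (groups are never empty, so the defaults are unreachable)
def pvPartOf (g : List Int) : String :=
  if g.length = 1 then PySem.Int.toStr (g.headD 0)
  else PySem.Int.toStr (g.headD 0) ++ "-" ++ PySem.Int.toStr (g.getLastD 0)

def amber_mask_from_indices_py_alt (atom_idxs : List Int) : String :=
  if atom_idxs.isEmpty then ""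
  else
    let vals := (PySem.List.sorted (PySem.Set.ofList atom_idxs) (fun x => x) false).map (· + 1)
    "@" ++ PySem.Str.join "," ((pvGroupRuns vals).map pvPartOf)

-- ===== PRECONDITION & SPEC =====
def Spec_amber_mask_from_indices_py (atom_idxs : List Int) (out : String) : Prop := out = amber_mask_from_indices_py_alt atom_idxs
instance (atom_idxs : List Int) (out : String) : Decidable (Spec_amber_mask_from_indices_py atom_idxs out) := by unfold Spec_amber_mask_from_indices_py; infer_instance

-- ===== CLAIM (what is proved, stated in full; the proofs are below) =====
def Claim_equal_amber_mask_from_indices_py : Prop := ∀ (atom_idxs : List Int), Dom_amber_mask_from_indices_py atom_idxs → Spec_amber_mask_from_indices_py atom_idxs (amber_mask_from_indices_py atom_idxs)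

-- ===== LEMMAS AND PROOFS =====

-- what A's loop emits for a run starting at `initial` and ending at `e`
def pvEmit (initial e : Int) : String :=
  if initial = e then PySem.Int.toStr initial
  else PySem.Int.toStr initial ++ "-" ++ PySem.Int.toStr e

theorem pvGroupRuns_nil : pvGroupRuns [] = [] := by rw [pvGroupRuns]

theorem pvGroupRuns_cons (v : Int) (vs : List Int) :
    pvGroupRuns (v :: vs) = (v :: (pvSpanRun v vs).1) :: pvGroupRuns (pvSpanRun v vs).2 := by
  rw [pvGroupRuns]

theorem pvSpanRun_last (v : Int) (vs : List Int) :
    (v :: (pvSpanRun v vs).1).getLastD 0 = v + ((pvSpanRun v vs).1.length : Int) := by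
  induction vs generalizing v with
  | nil => simp [pvSpanRun]
  | cons w ws ih =>
    simp only [pvSpanRun]
    split
    · rename_i h
      have hih := ih w
      rw [List.getLastD_cons] at hih
      rw [List.getLastD_cons, List.getLastD_cons, hih]
      simp only [List.length_cons]
      push_cast
      omega
    · simp

theorem pvPartOf_run (v : Int) (vs : List Int) :
    pvPartOf (v :: (pvSpanRun v vs).1) = pvEmit v ((v :: (pvSpanRun v vs).1).getLastD 0) := by
  have hlast := pvSpanRun_last v vs
  unfold pvPartOf pvEmit
  rcases h : (pvSpanRun v vs).1 with _ | ⟨a, as⟩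
  · simp
  · rw [h] at hlast
    have hne : ¬ (v = (v :: a :: as).getLastD 0) := by
      rw [hlast]
      simp only [List.length_cons]
      intro hc; omega
    have hll : ¬ ((v :: a :: as).length = 1) := by simp
    rw [if_neg hne, if_neg hll]
    simp

theorem pvLoopA_eq (n : Nat) : ∀ (vs : List Int), vs.length ≤ n → ∀ (prev initial : Int) (groups : List String),
    pvLoopA (prev :: vs) initial groups =
      groups ++ (pvEmit initial ((prev :: (pvSpanRun prev vs).1).getLastD 0)
                  :: (pvGroupRuns (pvSpanRun prev vs).2).map pvPartOf) := by
  induction n with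
  | zero =>
    intro vs hvs prev initial groups
    have : vs = [] := List.length_eq_zero_iff.mp (Nat.le_zero.mp hvs)
    subst this
    simp only [pvLoopA, pvSpanRun, pvGroupRuns_nil, List.map_nil, pvEmit, List.getLastD_cons,
      List.getLastD_nil]
    split <;> simp
  | succ n ih =>
    intro vs hvs prev initial groups
    cases vs with
    | nil =>
      simp only [pvLoopA, pvSpanRun, pvGroupRuns_nil, List.map_nil, pvEmit, List.getLastD_cons,
        List.getLastD_nil]
      split <;> simp
    | cons curr rest =>
      have hlen : rest.length ≤ n := by simpa using hvs
      by_cases hc : curr = prev + 1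
      · subst hc
        rw [pvLoopA.eq_def]
        simp only [ne_eq, not_true_eq_false, if_false]
        rw [ih rest hlen (prev + 1) initial groups]
        simp only [pvSpanRun]
        simp
      · rw [pvLoopA.eq_def]
        simp only [ne_eq, hc, not_false_eq_true, if_true]
        rw [ih rest hlen curr curr _]
        simp only [pvSpanRun, if_neg hc]
        rw [pvGroupRuns_cons, List.map_cons, pvPartOf_run curr rest]
        unfold pvEmit
        simp only [List.getLastD_cons, List.getLastD_nil]
        split <;> simp

-- ===== VERDICT (by name: the statement is the Claim_ definition above) =====
theorem amber_mask_from_indices_py_spec : Claim_equal_amber_mask_from_indices_py := by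
  intro atom_idxs _
  unfold Spec_amber_mask_from_indices_py amber_mask_from_indices_py amber_mask_from_indices_py_alt
  by_cases h : atom_idxs.isEmpty
  · simp [h]
  · simp only [if_neg h]
    cases hv : (PySem.List.sorted (PySem.Set.ofList atom_idxs) (fun x => x) false).map (· + 1) with
    | nil => simp [pvLoopA, pvGroupRuns_nil]
    | cons v vs =>
      simp only [List.headD_cons]
      rw [pvLoopA_eq vs.length vs le_rfl v v []]
      rw [pvGroupRuns_cons, List.map_cons, pvPartOf_run v vs]
      simp
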